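-- pv_equiv track=rewrite | github.com/jq728/cs101-2024 | Vasya and Socks.py | socks
-- ===== SOURCE A (Python) =====
-- def socks(n, m):
--     days = 0
--     socks = n
--     while socks > 0:
--         days += 1
--         if days % m == 0:
--             socks += 1
--         socks -= 1
--     return days
-- ===== SOURCE B (Python) =====
-- def socks(n, m):
--     # closed form: one extra sock every |m|-th day
--     if n <= 0:
--         return 0
--     period = abs(m)
--     return n + (n - 1) // (period - 1)
-- ===== Notes on version B (the rewrite author's own statement) =====
-- stated objective: faster
-- what changed: Replaced the day-by-day simulation loop with the closed form n + (n-1)//(|m|-1) (0 for n<=0).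
import Mathlib
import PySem

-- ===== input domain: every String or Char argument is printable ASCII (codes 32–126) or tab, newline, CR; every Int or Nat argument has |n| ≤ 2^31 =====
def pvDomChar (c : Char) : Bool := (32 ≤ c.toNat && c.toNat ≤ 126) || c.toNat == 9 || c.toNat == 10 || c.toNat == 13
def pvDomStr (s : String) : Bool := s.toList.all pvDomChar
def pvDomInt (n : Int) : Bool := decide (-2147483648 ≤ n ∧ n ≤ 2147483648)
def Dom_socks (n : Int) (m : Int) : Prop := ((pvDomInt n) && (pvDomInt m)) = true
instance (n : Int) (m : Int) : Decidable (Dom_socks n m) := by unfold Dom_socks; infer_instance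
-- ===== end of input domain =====

-- B replaces A's day-by-day simulation with the closed form n + (n-1)//(|m|-1) (0 for n ≤ 0); faster asymptotically.
-- Pre_socks excludes exactly the inputs on which A does not return: with n ≥ 1, m = 0 raises
-- ZeroDivisionError and m = 1 or m = -1 makes the loop run forever.


-- ===== PORT A =====
-- A's while-loop, made total with a fuel bound on the iteration count; on every input admitted by
-- Pre_socks the fuel chosen in 'socks' is enough (proved below), so the port computes exactly A's loop.
def socksLoop (fuel : Nat) (days : Int) (s : Int) (m : Int) : Int :=
  match fuel with
  | 0 => days
  | fuel + 1 =>
    if s > 0 then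
      socksLoop fuel (days + 1)
        ((if PySem.Int.mod (days + 1) m = 0 then s + 1 else s) - 1) m
    else days

def socks (n : Int) (m : Int) : Int :=
  socksLoop (m.natAbs * n.toNat + 1) 0 n m

-- ===== PORT B =====
def socks_alt (n : Int) (m : Int) : Int :=
  if n ≤ 0 then 0
  else n + PySem.Int.floordiv (n - 1) (|m| - 1)

-- ===== PRECONDITION & SPEC =====
-- Pre_socks excludes only inputs on which A never returns: with n ≥ 1, m = 0 raises
-- ZeroDivisionError and m = 1 or m = -1 loops forever.
def Pre_socks (n : Int) (m : Int) : Prop := n ≤ 0 ∨ m ≤ -2 ∨ 2 ≤ m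
instance (n : Int) (m : Int) : Decidable (Pre_socks n m) := by unfold Pre_socks; infer_instance
def pvWitness_socks : Int × Int := (5, 2)

def Spec_socks (n : Int) (m : Int) (out : Int) : Prop := out = socks_alt n m
instance (n : Int) (m : Int) (out : Int) : Decidable (Spec_socks n m out) := by unfold Spec_socks; infer_instance

-- ===== CLAIM (what is proved, stated in full; the proofs are below) =====
def Claim_equal_socks : Prop := ∀ (n : Int) (m : Int), Dom_socks n m → Pre_socks n m → Spec_socks n m (socks n m)

-- ===== LEMMAS AND PROOFS =====

-- Python's 'x % m == 0' is divisibility by |m|, for every nonzero m.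
lemma pymod_zero_iff (a m : Int) :
    (PySem.Int.mod a m = 0) ↔ a % (m.natAbs : Int) = 0 := by
  rw [PySem.Int.mod_eq_zero_iff_dvd, ← Int.natAbs_dvd, Int.dvd_iff_emod_eq_zero]

-- stepping the emod of the day counter
lemma emod_succ (days k : Int) (hk : 2 ≤ k) :
    (days + 1) % k = if days % k = k - 1 then 0 else days % k + 1 := by
  have h1 : (1 : Int) % k = 1 := Int.emod_eq_of_lt (by omega) (by omega)
  have hlt : days % k < k := Int.emod_lt_of_pos days (by omega)
  have hnn : 0 ≤ days % k := Int.emod_nonneg days (by omega)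
  rw [Int.add_emod, h1]
  split_ifs with h
  · rw [h]; simp
  · exact Int.emod_eq_of_lt (by omega) (by omega)

-- Loop invariant: with k = |m| ≥ 2, days ≥ 0, s ≥ 1 and enough fuel, the loop returns
-- days + s + (s - 1 + days % k) / (k - 1).
lemma socksLoop_closed (m : Int) (hm : 2 ≤ (m.natAbs : Int)) :
    ∀ (fuel : Nat) (days s : Int), 0 ≤ days → 1 ≤ s →
      (m.natAbs : Int) * s + days % (m.natAbs : Int) ≤ (fuel : Int) →
      socksLoop fuel days s m
        = days + s + (s - 1 + days % (m.natAbs : Int)) / ((m.natAbs : Int) - 1) := by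
  intro fuel
  induction fuel with
  | zero =>
    intro days s hd hs hf
    exfalso
    set k : Int := (m.natAbs : Int) with hk
    have h1 : 0 ≤ days % k := Int.emod_nonneg days (by omega)
    have h2 : k * 1 ≤ k * s := by nlinarith
    push_cast at hf
    linarith
  | succ f ih =>
    intro days s hd hs hf
    set k : Int := (m.natAbs : Int) with hk
    have hmne : m ≠ 0 := by intro h; rw [h] at hk; norm_num at hk; omega
    have hmod0 : 0 ≤ days % k := Int.emod_nonneg days (by omega)
    have hmodlt : days % k < k := Int.emod_lt_of_pos days (by omega)
    have hstep := emod_succ days k hm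
    have hfc : (k * s + days % k : Int) ≤ (f : Int) + 1 := by push_cast at hf; linarith
    rw [socksLoop, if_pos (by omega)]
    by_cases hdiv : PySem.Int.mod (days + 1) m = 0
    · -- (days+1) is a multiple of k: sock count unchanged
      rw [if_pos hdiv]
      have hz : (days + 1) % k = 0 := (pymod_zero_iff _ _).mp hdiv
      have hold : days % k = k - 1 := by
        by_contra hne
        rw [hstep, if_neg hne] at hz
        omega
      have hrec := ih (days + 1) (s + 1 - 1) (by omega) (by omega)
        (by
          have : k * (s + 1 - 1) = k * s := by ring
          rw [this, hz]
          linarith)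
      rw [hrec, hz]
      have hq : (s - 1 + days % k) / (k - 1) = (s - 1) / (k - 1) + 1 := by
        rw [hold]
        simpa using Int.add_mul_ediv_right (s - 1) 1 (show (k - 1 : Int) ≠ 0 by omega)
      rw [hq]
      have hz0 : (s + 1 - 1 - 1 + (0 : Int)) = s - 1 := by ring
      rw [hz0]
      ring
    · -- (days+1) is not a multiple of k: sock count drops by one
      rw [if_neg hdiv]
      have hz : ¬ (days + 1) % k = 0 := fun h => hdiv ((pymod_zero_iff _ _).mpr h)
      have hne : ¬ days % k = k - 1 := by
        intro h
        rw [hstep, if_pos h] at hz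
        exact hz rfl
      rw [if_neg hne] at hstep
      by_cases hs1 : s = 1
      · -- socks run out: both sides are days + 1
        subst hs1
        have hstop : socksLoop f (days + 1) (1 - 1) m = days + 1 := by
          cases f <;> simp [socksLoop]
        rw [hstop]
        have hzero : ((1 : Int) - 1 + days % k) / (k - 1) =  0 :=
          Int.ediv_eq_zero_of_lt (by omega) (by omega)
        rw [hzero]
        ring
      · have hrec := ih (days + 1) (s - 1) (by omega) (by omega)
          (by
            have hexp : k * (s - 1) = k * s - k := by ring
            rw [hexp, hstep]
            linarith)
        rw [hrec, hstep]
        have harg : s - 1 - 1 + (days % k + 1) = s - 1 + days % k := by ring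
        rw [harg]
        ring

-- ===== VERDICT (by name: the statement is the Claim_ definition above) =====
theorem socks_spec : Claim_equal_socks := by
  intro n m _ hpre
  unfold Spec_socks socks socks_alt
  by_cases hn : n ≤ 0
  · rw [if_pos hn, socksLoop, if_neg (by omega)]
  · rw [if_neg hn]
    have hk : 2 ≤ (m.natAbs : Int) := by
      rcases hpre with h | h | h
      · omega
      all_goals (have := Int.natAbs_eq m; omega)
    have htn : ((n.toNat : Int)) = n := Int.toNat_of_nonneg (by omega)
    have hfuel : (m.natAbs : Int) * n + (0 : Int) % (m.natAbs : Int)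
        ≤ ((m.natAbs * n.toNat + 1 : Nat) : Int) := by
      push_cast
      rw [htn, Int.zero_emod]
      linarith
    rw [socksLoop_closed m hk _ 0 n (le_refl 0) (by omega) hfuel]
    rw [Int.abs_eq_natAbs m, PySem.Int.floordiv_eq_ediv_of_pos (by omega)]
    rw [Int.zero_emod]
    norm_num
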